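-- pv_equiv track=rewrite | github.com/petcomputacaoufrgs/pet-data | plots.py | quebraStrings
-- ===== SOURCE A (Python) =====
-- def quebraStrings(string):
--
--     contador_spaces = 0
--
--     # itera pela string para cada char pegando o index e o char propriamente dito
--     for index, char in enumerate(string):
--         if char == ' ' and contador_spaces != 1:
--             contador_spaces += 1
--
--         elif char == ' ':  # caso seja o segundo espaço, irá introduzir \n na string
--             string = string[:index] + '\n' + string[index + 1:]
--             contador_spaces = 0  # reseta contador
--
--     return string
-- ===== SOURCE B (Python) =====
-- def quebraStrings(string):
--     parts = string.split(' ')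
--     out = [parts[0]]
--     for i, part in enumerate(parts[1:]):
--         out.append(' ' if i % 2 == 0 else '\n')
--         out.append(part)
--     return ''.join(out)
-- ===== Notes on version B (the rewrite author's own statement) =====
-- stated objective: faster
-- what changed: B tokenises with split(' ') and rejoins the tokens with alternating space/newline separators chosen by separator-index parity, instead of scanning characters with a space counter and rewriting the whole string in place by slicing at every second space.
import Mathlib
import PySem

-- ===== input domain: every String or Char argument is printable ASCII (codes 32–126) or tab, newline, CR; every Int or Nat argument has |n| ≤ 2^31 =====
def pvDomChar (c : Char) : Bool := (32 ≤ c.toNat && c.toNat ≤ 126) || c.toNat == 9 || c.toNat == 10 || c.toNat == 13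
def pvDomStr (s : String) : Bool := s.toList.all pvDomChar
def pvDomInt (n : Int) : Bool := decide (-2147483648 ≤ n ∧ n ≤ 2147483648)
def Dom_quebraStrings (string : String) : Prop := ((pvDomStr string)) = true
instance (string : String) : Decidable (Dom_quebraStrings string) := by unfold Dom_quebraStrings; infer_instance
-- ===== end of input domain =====

-- B tokenises with split(' ') and rejoins with alternating ' '/'\n' separators instead of
-- scanning characters with a counter and rewriting the string in place (objective: faster — A rebuilds the string at every second space).


-- ===== PORT A =====
-- loop body of A: state = (current string as chars, contador_spaces)
def quebraStringsStepA (st : List Char × Int) (p : Int × Char) : List Char × Int :=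
  if p.2 = ' ' ∧ st.2 ≠ 1 then (st.1, st.2 + 1)
  else if p.2 = ' ' then
    (PySem.List.slice st.1 none (some p.1) ++ ['\n'] ++ PySem.List.slice st.1 (some (p.1 + 1)) none, 0)
  else st

def quebraStrings (string : String) : String :=
  let cs := string.toList
  -- Python's enumerate(string) iterates the ORIGINAL string object; the rebinding of `string`
  -- inside the loop does not affect the iterator, so we fold over `enumerate cs` of the original.
  let r := (PySem.List.enumerate cs).foldl quebraStringsStepA (cs, 0)
  String.ofList r.1

-- ===== PORT B =====
def quebraStrings_alt (string : String) : String :=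
  let parts := PySem.Chars.splitOn string.toList [' ']
  -- parts[0]: split(' ') always returns a nonempty list, so parts[0] = parts.headD []
  let out := (PySem.List.enumerate (PySem.List.slice parts (some 1) none)).foldl
    (fun acc p => acc ++ [if PySem.Int.mod p.1 2 = 0 then [' '] else ['\n']] ++ [p.2])
    [parts.headD []]
  String.ofList (PySem.Chars.join [] out)

-- ===== PRECONDITION & SPEC =====
def Spec_quebraStrings (string : String) (out : String) : Prop := out = quebraStrings_alt string
instance (string : String) (out : String) : Decidable (Spec_quebraStrings string out) := by unfold Spec_quebraStrings; infer_instance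

-- ===== CLAIM (what is proved, stated in full; the proofs are below) =====
def Claim_equal_quebraStrings : Prop := ∀ (string : String), Dom_quebraStrings string → Spec_quebraStrings string (quebraStrings string)

-- ===== LEMMAS AND PROOFS =====

-- reference recursion: A's per-character effect, counter carried explicitly
def goQ : List Char → Int → List Char
  | [], _ => []
  | x :: t, c =>
    if x = ' ' ∧ c ≠ 1 then x :: goQ t (c + 1)
    else if x = ' ' then '\n' :: goQ t 0
    else x :: goQ t c

-- clean structural version of split(' '): accumulate the current token in front
def mySplit : List Char → List Char → List (List Char)
  | pre, [] => [pre]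
  | pre, x :: t => if x = ' ' then pre :: mySplit [] t else mySplit (pre ++ [x]) t

def altQ : List (List Char) → Bool → List Char
  | [], _ => []
  | p :: ps, b => (if b then '\n' else ' ') :: (p ++ altQ ps (!b))

def joinAltQ : List (List Char) → Bool → List Char
  | [], _ => []
  | p :: ps, b => p ++ altQ ps b

lemma mySplit_ne_nil (s pre : List Char) : mySplit pre s ≠ [] := by
  induction s generalizing pre with
  | nil => simp [mySplit]
  | cons x t ih => simp only [mySplit]; split_ifs <;> simp [ih]

-- A's fold equals goQ
lemma A_loop (suf pre : List Char) (c : Int) :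
    ((PySem.List.enumerate suf (pre.length : Int)).foldl quebraStringsStepA (pre ++ suf, c)).1
      = pre ++ goQ suf c := by
  induction suf generalizing pre c with
  | nil => simp [PySem.List.enumerate_nil, goQ]
  | cons x t ih =>
    rw [PySem.List.enumerate_cons, List.foldl_cons]
    by_cases hx : x = ' '
    · by_cases hc : c = 1
      · have hstep : quebraStringsStepA (pre ++ x :: t, c) ((pre.length : Int), x)
            = (pre ++ '\n' :: t, 0) := by
          simp only [quebraStringsStepA, hx, hc]
          norm_num
          rw [show ((pre.length : Int) + 1) = ((pre.length + 1 : Nat) : Int) by push_cast; ring,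
            PySem.List.slice_from_natCast]
          simp
        rw [hstep]
        have h2 : ((pre.length : Int) + 1) = (((pre ++ ['\n']).length : Nat) : Int) := by
          simp
        rw [h2]
        have h3 : pre ++ '\n' :: t = (pre ++ ['\n']) ++ t := by simp
        rw [h3, ih]
        simp [goQ, hx, hc]
      · have hstep : quebraStringsStepA (pre ++ x :: t, c) ((pre.length : Int), x)
            = (pre ++ x :: t, c + 1) := by
          simp [quebraStringsStepA, hx, hc]
        rw [hstep]
        have h2 : ((pre.length : Int) + 1) = (((pre ++ [x]).length : Nat) : Int) := by
          simp
        have h3 : pre ++ x :: t = (pre ++ [x]) ++ t := by simp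
        rw [h2, h3, ih]
        simp [goQ, hx, hc]
    · have hstep : quebraStringsStepA (pre ++ x :: t, c) ((pre.length : Int), x)
          = (pre ++ x :: t, c) := by
        simp [quebraStringsStepA, hx]
      rw [hstep]
      have h2 : ((pre.length : Int) + 1) = (((pre ++ [x]).length : Nat) : Int) := by
        simp
      have h3 : pre ++ x :: t = (pre ++ [x]) ++ t := by simp
      rw [h2, h3, ih]
      simp [goQ, hx]

-- PySem's fueled split(' ') equals mySplit
lemma splitOn_go_spec (fuel : Nat) (l cur : List Char) (acc : List (List Char))
    (h : l.length < fuel) :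
    PySem.Chars.splitOn.go [' '] fuel l cur acc = acc.reverse ++ mySplit cur.reverse l := by
  induction fuel generalizing l cur acc with
  | zero => omega
  | succ f ih =>
    cases l with
    | nil => simp [PySem.Chars.splitOn.go, mySplit]
    | cons x t =>
      by_cases hx : x = ' '
      · subst hx
        rw [show PySem.Chars.splitOn.go [' '] (f + 1) (' ' :: t) cur acc
              = PySem.Chars.splitOn.go [' '] f t [] (cur.reverse :: acc) by
            simp [PySem.Chars.splitOn.go, List.isPrefixOf]]
        rw [ih t [] (cur.reverse :: acc) (by simpa using Nat.lt_of_succ_lt_succ h)]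
        simp [mySplit]
      · rw [show PySem.Chars.splitOn.go [' '] (f + 1) (x :: t) cur acc
              = PySem.Chars.splitOn.go [' '] f t (x :: cur) acc by
            simp [PySem.Chars.splitOn.go, List.isPrefixOf, Ne.symm hx]]
        rw [ih t (x :: cur) acc (by simpa using Nat.lt_of_succ_lt_succ h)]
        simp [mySplit, hx]

lemma splitOn_eq_mySplit (s : List Char) :
    PySem.Chars.splitOn s [' '] = mySplit [] s := by
  rw [PySem.Chars.splitOn, splitOn_go_spec (s.length + 1) s [] [] (by omega)]
  simp

-- B's enumerate/parity fold, flattened, equals altQ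
lemma B_alt_loop (ps : List (List Char)) (k : Nat) :
    ((PySem.List.enumerate ps (k : Int)).flatMap
        (fun p => [if PySem.Int.mod p.1 2 = 0 then [' '] else ['\n']] ++ [p.2])).flatten
      = altQ ps (decide (k % 2 = 1)) := by
  induction ps generalizing k with
  | nil => simp [PySem.List.enumerate_nil, altQ]
  | cons p t ih =>
    have hmod : PySem.Int.mod (k : Int) 2 = ((k % 2 : Nat) : Int) :=
      PySem.Int.mod_natCast k 2
    have h2 : ((k : Int) + 1) = (((k + 1 : Nat)) : Int) := by push_cast; ring
    rw [PySem.List.enumerate_cons, List.flatMap_cons, List.flatten_append, h2, ih (k + 1), hmod]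
    rcases Nat.mod_two_eq_zero_or_one k with hk | hk <;> simp [hk, altQ, Nat.add_mod]

-- rejoining mySplit with alternating separators recovers goQ
lemma joinAlt_mySplit (s pre : List Char) (b : Bool) :
    joinAltQ (mySplit pre s) b = pre ++ goQ s (if b then 1 else 0) := by
  induction s generalizing pre b with
  | nil => cases b <;> simp [mySplit, joinAltQ, altQ, goQ]
  | cons x t ih =>
    by_cases hx : x = ' '
    · subst hx
      rw [show mySplit pre (' ' :: t) = pre :: mySplit [] t by simp [mySplit]]
      obtain ⟨q, qs, hq⟩ : ∃ q qs, mySplit [] t = q :: qs := by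
        cases h : mySplit [] t with
        | nil => exact absurd h (mySplit_ne_nil t [])
        | cons q qs => exact ⟨q, qs, rfl⟩
      rw [hq]
      cases b
      · have h1 := ih (pre := []) (b := true)
        rw [hq] at h1
        simp only [joinAltQ] at h1
        simp [joinAltQ, altQ, goQ, h1]
      · have h1 := ih (pre := []) (b := false)
        rw [hq] at h1
        simp only [joinAltQ] at h1
        simp [joinAltQ, altQ, goQ, h1]
    · rw [show mySplit pre (x :: t) = mySplit (pre ++ [x]) t by simp [mySplit, hx]]
      rw [ih]
      cases b <;> simp [goQ, hx]

-- ''.join with empty separator is concatenation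
lemma join_nil_flatten (l : List (List Char)) : PySem.Chars.join [] l = l.flatten := by
  induction l with
  | nil => simp [PySem.Chars.join, List.intercalate]
  | cons a t ih =>
    cases t with
    | nil => simp [PySem.Chars.join, List.intercalate]
    | cons b t2 =>
      rw [PySem.Chars.join_cons_cons, ih]
      simp

-- the two ports agree on the character level
lemma final_eq (cs : List Char) :
    ((PySem.List.enumerate cs).foldl quebraStringsStepA (cs, 0)).1
      = PySem.Chars.join []
          ((PySem.List.enumerate (PySem.List.slice (PySem.Chars.splitOn cs [' ']) (some 1) none)).foldl
            (fun acc p => acc ++ [if PySem.Int.mod p.1 2 = 0 then [' '] else ['\n']] ++ [p.2])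
            [(PySem.Chars.splitOn cs [' ']).headD []]) := by
  have hA := A_loop cs [] 0
  simp only [List.length_nil, Nat.cast_zero, List.nil_append] at hA
  rw [hA, PySem.List.slice_from_one, splitOn_eq_mySplit]
  simp only [List.append_assoc]
  rw [PySem.List.foldl_append_eq_flatMap
        (fun (p : Int × List Char) => [if PySem.Int.mod p.1 2 = 0 then [' '] else ['\n']] ++ [p.2])
        (PySem.List.enumerate (mySplit [] cs).tail) [(mySplit [] cs).headD []]]
  obtain ⟨q, qs, hq⟩ : ∃ q qs, mySplit [] cs = q :: qs := by
    cases h : mySplit [] cs with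
    | nil => exact absurd h (mySplit_ne_nil cs [])
    | cons q qs => exact ⟨q, qs, rfl⟩
  rw [hq, join_nil_flatten]
  have hB : (List.flatMap
      (fun p => [if PySem.Int.mod p.1 2 = 0 then [' '] else ['\n']] ++ [p.2])
      (PySem.List.enumerate qs)).flatten = altQ qs false := by
    simpa using B_alt_loop qs 0
  have hJ := joinAlt_mySplit cs [] false
  rw [hq] at hJ
  simp only [joinAltQ, List.nil_append, Bool.false_eq_true, if_false] at hJ
  rw [List.tail_cons, List.headD_cons, List.singleton_append, List.flatten_cons, hB]
  exact hJ.symm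

-- ===== VERDICT (by name: the statement is the Claim_ definition above) =====
theorem quebraStrings_spec : Claim_equal_quebraStrings := by
  intro s _
  unfold Spec_quebraStrings quebraStrings quebraStrings_alt
  exact congrArg String.ofList (final_eq s.toList)
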